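-- pv_equiv track=rewrite | github.com/8n8/trumat | rules.py | mark_start_newline_lists
-- ===== SOURCE A (Python) =====
-- def list_has_newlines_forward(old, i):
--     level = 1
--
--     while level != 0:
--         if old[i] == "\n":
--             return True
--
--         if old[i] == "[":
--             level += 1
--
--         if old[i] == "]":
--             level -= 1
--
--         i += 1
--
--     return False
--
-- def list_is_empty_forward(old, i):
--     while i < len(old) and (old[i] == " " or old[i] == "\n"):
--         i += 1
--
--     return old[i] == "]"
--
-- def mark_start_newline_lists(old):
--     new = ""
--     for i, c in enumerate(old):
--         if (
--             c == "["
--             and list_has_newlines_forward(old, i + 1)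
--             and not list_is_empty_forward(old, i + 1)
--         ):
--
--             new += "L"
--             continue
--
--         new += c
--
--     return new, None
-- ===== SOURCE B (Python) =====
-- def mark_start_newline_lists(old):
--     n = len(old)
--     # nxt[i] = first char at index >= i that is not ' ' or '\n' (None if none)
--     nxt = [None] * (n + 1)
--     for i in range(n - 1, -1, -1):
--         c = old[i]
--         nxt[i] = nxt[i + 1] if (c == ' ' or c == '\n') else c
--     # one left-to-right pass: stack of (position of '[', newlines seen at push)
--     stack = []
--     nl = 0
--     rep = set()
--     for i, c in enumerate(old):
--         if c == '\n':
--             nl += 1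
--         elif c == '[':
--             stack.append((i, nl))
--         elif c == ']':
--             if stack:
--                 j, nl0 = stack.pop()
--                 if nl0 < nl:
--                     rep.add(j)
--     for j, nl0 in stack:  # unclosed '[': multiline iff any newline after it
--         if nl0 < nl:
--             rep.add(j)
--     out = ''.join('L' if (i in rep and nxt[i + 1] != ']') else c
--                   for i, c in enumerate(old))
--     return out, None
-- ===== Notes on version B (the rewrite author's own statement) =====
-- stated objective: alternative
-- what changed: A rescans forward from every '[' (a bracket-level scan for a newline before the matching ']' plus a blank-skip scan, quadratic in the worst case); B instead makes one left-to-right pass with a stack of open-'[' positions and newline counters, plus one right-to-left pass precomputing the next non-blank character, touching each position O(1) times.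
-- outside the precondition, e.g. on mark_start_newline_lists('['): A raises IndexError, B returns ('[', None)
import Mathlib
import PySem

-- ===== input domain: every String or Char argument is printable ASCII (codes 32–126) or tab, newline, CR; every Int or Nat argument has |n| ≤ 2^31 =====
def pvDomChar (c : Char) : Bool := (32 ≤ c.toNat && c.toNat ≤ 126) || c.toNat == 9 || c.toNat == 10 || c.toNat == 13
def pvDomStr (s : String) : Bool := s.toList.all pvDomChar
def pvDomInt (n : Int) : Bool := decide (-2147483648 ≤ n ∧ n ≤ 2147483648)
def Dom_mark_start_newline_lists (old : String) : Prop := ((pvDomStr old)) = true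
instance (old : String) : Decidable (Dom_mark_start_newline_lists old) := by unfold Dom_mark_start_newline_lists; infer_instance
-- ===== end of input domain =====

-- B replaces A's per-'[' forward rescans by one stack pass (matching brackets + newline
-- counters) plus a right-to-left next-non-blank pass; objective: alternative algorithm.


-- ===== PORT A =====
-- level update of list_has_newlines_forward's loop body
def pvStepA (lvl : Int) (c : Char) : Int :=
  (lvl + (if c = '[' then 1 else 0)) - (if c = ']' then 1 else 0)

-- list_has_newlines_forward(old, i) scanning the suffix old[i:]; none = IndexError
def pvLhnf : Int → List Char → Option Bool
  | lvl, [] => if lvl = 0 then some false else none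
  | lvl, c :: rest =>
    if lvl = 0 then some false
    else if c = '\n' then some true
    else pvLhnf (pvStepA lvl c) rest

-- list_is_empty_forward(old, i) scanning the suffix old[i:]; none = IndexError
def pvLie : List Char → Option Bool
  | [] => none
  | c :: rest => if c = ' ' || c = '\n' then pvLie rest else some (c == ']')

-- the 'for i, c in enumerate(old)' loop; each helper call scans the suffix after c
def pvGoA : List Char → Option (List Char)
  | [] => some []
  | c :: rest =>
    if c = '[' then
      match pvLhnf 1 rest, pvLie rest with
      | some true, some false => (pvGoA rest).map (fun t => 'L' :: t)
      | some true, some true => (pvGoA rest).map (fun t => c :: t)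
      | some false, _ => (pvGoA rest).map (fun t => c :: t)
      | _, _ => none
    else (pvGoA rest).map (fun t => c :: t)

def mark_start_newline_lists (old : String) : String × Option String :=
  match pvGoA old.toList with
  | some cs => (String.ofList cs, none)
  | none => ("", none)   -- unreachable under Pre_: Python raises IndexError here

-- ===== PORT B =====
-- nxt array of Source B, built right to left: entry i = first char ≥ i that is not ' '/'\n'
def pvNxts : List Char → List (Option Char)
  | [] => [none]
  | c :: rest =>
    let r := pvNxts rest
    (if c = ' ' || c = '\n' then r.headD none else some c) :: r

-- the single left-to-right pass: stack of (position of '[', newline count at push)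
def pvPassB : List Char → Nat → List (Nat × Nat) → Nat → List Nat →
    List (Nat × Nat) × Nat × List Nat
  | [], _, stack, nl, rep => (stack, nl, rep)
  | c :: v, k, stack, nl, rep =>
    if c = '\n' then pvPassB v (k+1) stack (nl+1) rep
    else if c = '[' then pvPassB v (k+1) ((k, nl) :: stack) nl rep
    else if c = ']' then
      match stack with
      | [] => pvPassB v (k+1) [] nl rep
      | (j, nl0) :: s => pvPassB v (k+1) s nl (if nl0 < nl then j :: rep else rep)
    else pvPassB v (k+1) stack nl rep

-- the final flush of unclosed '[' (Source B's loop over the leftover stack)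
def pvFlush : List (Nat × Nat) × Nat × List Nat → List Nat
  | (stack, nl, rep) => rep ++ (stack.filter (fun p => p.2 < nl)).map Prod.fst

def pvRep (l : List Char) : List Nat := pvFlush (pvPassB l 0 [] 0 [])

-- the output comprehension of Source B
def pvOutB : List Char → Nat → List Nat → List (Option Char) → List Char
  | [], _, _, _ => []
  | c :: v, k, rep, nx =>
    (if rep.contains k && nx.getD (k+1) none != some ']' then 'L' else c) ::
      pvOutB v (k+1) rep nx

def mark_start_newline_lists_alt (old : String) : String × Option String :=
  let l := old.toList
  (String.ofList (pvOutB l 0 (pvRep l) (pvNxts l)), none)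

-- ===== PRECONDITION & SPEC =====
-- helpers for Pre_: bracket balance of a prefix, and 'the scan from a "[" closes
-- (balance reaches the level) before the first newline'
def pvBal (p : List Char) : Int := (p.count ']' : Int) - (p.count '[' : Int)

def pvClosedFrom (lvl : Int) (tw : List Char) : Bool :=
  (List.range (tw.length + 1)).any (fun j => lvl ≤ pvBal (tw.take j))

-- the suffix after a '[' on which A's two helper scans both stay in bounds
def pvOkSuffix (s : List Char) : Bool :=
  pvClosedFrom 1 (s.takeWhile (fun c => c != '\n')) ||
  (s.contains '\n' && s.any (fun c => !(c = ' ' || c = '\n')))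

-- Pre_ excludes exactly the inputs where A raises IndexError: some '[' whose suffix
-- neither closes before the first newline nor (has a newline and a non-blank char).
def Pre_mark_start_newline_lists (old : String) : Prop :=
  ∀ i < old.toList.length, old.toList.getD i ' ' = '[' →
    pvOkSuffix (old.toList.drop (i+1)) = true
instance (old : String) : Decidable (Pre_mark_start_newline_lists old) := by
  unfold Pre_mark_start_newline_lists; infer_instance

def pvWitness_mark_start_newline_lists : String := "[\na]"

def Spec_mark_start_newline_lists (old : String) (out : String × Option String) : Prop := out = mark_start_newline_lists_alt old
instance (old : String) (out : String × Option String) : Decidable (Spec_mark_start_newline_lists old out) := by unfold Spec_mark_start_newline_lists; infer_instance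

-- ===== CLAIM (what is proved, stated in full; the proofs are below) =====
def Claim_equal_mark_start_newline_lists : Prop := ∀ (old : String), Dom_mark_start_newline_lists old → Pre_mark_start_newline_lists old → Spec_mark_start_newline_lists old (mark_start_newline_lists old)

-- ===== LEMMAS AND PROOFS =====

-- the running state of A's level scan: inl lvl = still scanning, inr r = returned r
def pvRun : Int → List Char → Sum Int (Option Bool)
  | lvl, [] => Sum.inl lvl
  | lvl, c :: rest =>
    if lvl = 0 then Sum.inr (some false)
    else if c = '\n' then Sum.inr (some true)
    else pvRun (pvStepA lvl c) rest

theorem pvRun_append (u v : List Char) (lvl : Int) :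
    pvRun lvl (u ++ v) =
      match pvRun lvl u with
      | Sum.inl l' => pvRun l' v
      | Sum.inr r => Sum.inr r := by
  induction u generalizing lvl with
  | nil => rfl
  | cons c u ih =>
    simp only [List.cons_append, pvRun]
    split_ifs <;> simp [ih]

theorem pvLhnf_append (u v : List Char) (lvl : Int) :
    pvLhnf lvl (u ++ v) =
      match pvRun lvl u with
      | Sum.inl l' => pvLhnf l' v
      | Sum.inr r => r := by
  induction u generalizing lvl with
  | nil => rfl
  | cons c u ih =>
    simp only [List.cons_append, pvLhnf, pvRun]
    split_ifs <;> simp [ih]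

theorem pvLhnf_zero (s : List Char) : pvLhnf 0 s = some false := by
  cases s <;> simp [pvLhnf]

theorem pvDrop_split (l : List Char) (j k : Nat) (h : j + 1 ≤ k) :
    l.drop (j+1) = (l.drop (j+1)).take (k - (j+1)) ++ l.drop k := by
  conv_lhs => rw [← List.take_append_drop (k - (j+1)) (l.drop (j+1))]
  rw [List.drop_drop, Nat.add_sub_cancel' h]

theorem pvAD_from_run (l : List Char) (j k : Nat) (d : Int) (h : j + 1 ≤ k)
    (hr : pvRun 1 ((l.drop (j+1)).take (k - (j+1))) = Sum.inl d) :
    pvLhnf 1 (l.drop (j+1)) = pvLhnf d (l.drop k) := by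
  conv_lhs => rw [pvDrop_split l j k h]
  rw [pvLhnf_append, hr]

theorem pvRun_take_succ (l : List Char) (j k : Nat) (d : Int) (c : Char)
    (hjk : j + 1 ≤ k) (hkc : l[k]? = some c)
    (hr : pvRun 1 ((l.drop (j+1)).take (k - (j+1))) = Sum.inl d)
    (hd : d ≠ 0) (hc : c ≠ '\n') :
    pvRun 1 ((l.drop (j+1)).take (k + 1 - (j+1))) = Sum.inl (pvStepA d c) := by
  have h1 : k + 1 - (j+1) = (k - (j+1)) + 1 := by omega
  have h2 : (l.drop (j+1))[k - (j+1)]? = some c := by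
    rw [List.getElem?_drop]
    rwa [Nat.add_sub_cancel' hjk]
  rw [h1, List.take_add_one, h2, pvRun_append, hr]
  simp [pvRun, hd, hc]

-- invariant for one stack entry e at depth d (0-based from the top), position k reached
def pvEntry (l : List Char) (k nl d : Nat) (e : Nat × Nat) : Prop :=
  e.1 + 1 ≤ k ∧ e.1 < l.length ∧ l.getD e.1 ' ' = '[' ∧
  ((e.2 < nl ∧ pvLhnf 1 (l.drop (e.1+1)) = some true) ∨
   (e.2 = nl ∧ pvRun 1 ((l.drop (e.1+1)).take (k - (e.1+1))) = Sum.inl ((d : Int)+1)))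

def pvSInv (l : List Char) (k : Nat) (stack : List (Nat × Nat)) (nl : Nat) : Prop :=
  stack.Pairwise (fun a b => b.1 < a.1) ∧
  ∀ d, (h : d < stack.length) → pvEntry l k nl d stack[d]

theorem pvFlush_mem (st : List (Nat × Nat)) (nl : Nat) (rep : List Nat) (j : Nat) :
    j ∈ pvFlush (st, nl, rep) ↔ j ∈ rep ∨ ∃ nl0, (j, nl0) ∈ st ∧ nl0 < nl := by
  simp only [pvFlush, List.mem_append, List.mem_map, List.mem_filter, decide_eq_true_eq]
  apply or_congr Iff.rfl
  constructor
  · rintro ⟨⟨a, b⟩, ⟨hm, hlt⟩, rfl⟩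
    exact ⟨b, hm, hlt⟩
  · rintro ⟨nl0, hm, hlt⟩
    exact ⟨(j, nl0), ⟨hm, hlt⟩, rfl⟩

theorem pvClauseShift (l : List Char) (k j : Nat) (h : l.getD k ' ' ≠ '[') :
    (k ≤ j ∧ j < l.length ∧ l.getD j ' ' = '[' ∧ pvLhnf 1 (l.drop (j+1)) = some true) ↔
    (k+1 ≤ j ∧ j < l.length ∧ l.getD j ' ' = '[' ∧ pvLhnf 1 (l.drop (j+1)) = some true) := by
  constructor
  · rintro ⟨h1, h2, h3, h4⟩
    refine ⟨?_, h2, h3, h4⟩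
    rcases Nat.eq_or_lt_of_le h1 with rfl | hlt
    · exact absurd h3 h
    · omega
  · rintro ⟨h1, h2, h3, h4⟩
    exact ⟨by omega, h2, h3, h4⟩

theorem pvEntry_run_step (l : List Char) (k nl d : Nat) (e : Nat × Nat) (c : Char)
    (hck : l[k]? = some c) (hc : c ≠ '\n') (h : pvEntry l k nl d e) (d' : Nat)
    (hd' : pvStepA ((d : Int)+1) c = (d' : Int)+1) :
    pvEntry l (k+1) nl d' e := by
  obtain ⟨h1, h2, h3, h4⟩ := h
  refine ⟨by omega, h2, h3, ?_⟩
  rcases h4 with ⟨ha, hb⟩ | ⟨ha, hb⟩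
  · exact Or.inl ⟨ha, hb⟩
  · refine Or.inr ⟨ha, ?_⟩
    have hstep := pvRun_take_succ l e.1 k ((d : Int)+1) c h1 hck hb (by omega) hc
    rw [hd'] at hstep
    exact hstep

theorem pvPassB_mem (l : List Char) (v : List Char) :
    ∀ (k : Nat) (stack : List (Nat × Nat)) (nl : Nat) (rep : List Nat),
    l.drop k = v → pvSInv l k stack nl →
    ∀ j, j ∈ pvFlush (pvPassB v k stack nl rep) ↔
      (j ∈ rep ∨ (∃ nl0, (j, nl0) ∈ stack ∧ pvLhnf 1 (l.drop (j+1)) = some true) ∨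
       (k ≤ j ∧ j < l.length ∧ l.getD j ' ' = '[' ∧ pvLhnf 1 (l.drop (j+1)) = some true)) := by
  induction v with
  | nil =>
    intro k stack nl rep hk hinv j
    obtain ⟨hPW, hE⟩ := hinv
    have hkl : l.length ≤ k := List.drop_eq_nil_iff.mp hk
    rw [show pvPassB [] k stack nl rep = (stack, nl, rep) from rfl, pvFlush_mem]
    have hstack : ∀ e, e ∈ stack → (e.2 < nl ↔ pvLhnf 1 (l.drop (e.1+1)) = some true) := by
      intro e he
      obtain ⟨d, hd, he'⟩ := List.mem_iff_getElem.mp he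
      have hent := hE d hd
      rw [he'] at hent
      obtain ⟨h1, h2, h3, h4⟩ := hent
      rcases h4 with ⟨ha, hb⟩ | ⟨ha, hb⟩
      · simp [ha, hb]
      · have hAD := pvAD_from_run l e.1 k _ h1 hb
        rw [hk] at hAD
        have hnone : pvLhnf ((d : Int)+1) ([] : List Char) = none := by
          simp only [pvLhnf]
          rw [if_neg (by omega)]
        rw [hnone] at hAD
        constructor
        · intro hlt; omega
        · intro ht; rw [hAD] at ht; simp at ht
    constructor
    · rintro (h | ⟨nl0, hm, hlt⟩)
      · exact Or.inl h
      · exact Or.inr (Or.inl ⟨nl0, hm, (hstack _ hm).mp hlt⟩)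
    · rintro (h | ⟨nl0, hm, hAD⟩ | ⟨h1, h2, -, -⟩)
      · exact Or.inl h
      · exact Or.inr ⟨nl0, hm, (hstack _ hm).mpr hAD⟩
      · omega
  | cons c v' ih =>
    intro k stack nl rep hk hinv j
    obtain ⟨hPW, hE⟩ := hinv
    have hkl : k < l.length := by
      by_contra hge
      rw [List.drop_eq_nil_of_le (by omega)] at hk
      simp at hk
    have hck : l[k]? = some c := by
      have h0 : (l.drop k)[0]? = l[k + 0]? := List.getElem?_drop
      rw [hk] at h0
      simpa using h0.symm
    have hgd : l.getD k ' ' = c := by rw [List.getD_eq_getElem?_getD, hck]; rfl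
    have hv' : l.drop (k+1) = v' := by
      have := congrArg (List.drop 1) hk
      rw [List.drop_drop] at this
      simpa using this
    have hmemk : ∀ e ∈ stack, e.1 + 1 ≤ k := by
      intro e he
      obtain ⟨d, hd, he'⟩ := List.mem_iff_getElem.mp he
      have := (hE d hd).1
      rwa [he'] at this
    by_cases hc1 : c = '\n'
    · have hstep : pvPassB (c :: v') k stack nl rep = pvPassB v' (k+1) stack (nl+1) rep := by
        simp [pvPassB, hc1]
      have hinv' : pvSInv l (k+1) stack (nl+1) := by
        refine ⟨hPW, ?_⟩
        intro d hd
        obtain ⟨h1, h2, h3, h4⟩ := hE d hd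
        refine ⟨by omega, h2, h3, Or.inl ?_⟩
        rcases h4 with ⟨ha, hb⟩ | ⟨ha, hb⟩
        · exact ⟨by omega, hb⟩
        · refine ⟨by omega, ?_⟩
          have hAD := pvAD_from_run l _ k _ h1 hb
          rw [hk, hc1] at hAD
          rw [hAD]
          simp only [pvLhnf]
          rw [if_neg (by omega)]
          simp
      rw [hstep, ih (k+1) stack (nl+1) rep hv' hinv' j]
      have hsh := pvClauseShift l k j (by rw [hgd, hc1]; decide)
      exact or_congr Iff.rfl (or_congr Iff.rfl hsh.symm)
    · by_cases hc2 : c = '['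
      · have hstep : pvPassB (c :: v') k stack nl rep =
            pvPassB v' (k+1) ((k, nl) :: stack) nl rep := by
          simp [pvPassB, hc2]
        have hinv' : pvSInv l (k+1) ((k, nl) :: stack) nl := by
          constructor
          · rw [List.pairwise_cons]
            exact ⟨fun b hb => by have := hmemk b hb; omega, hPW⟩
          · intro d hd
            match d with
            | 0 =>
              simp only [List.getElem_cons_zero]
              refine ⟨le_refl _, hkl, by rw [hgd, hc2], Or.inr ⟨rfl, ?_⟩⟩
              
              rw [Nat.sub_self, List.take_zero]
              norm_num [pvRun]
            | d+1 =>
              have hd2 : d < stack.length := by simpa using hd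
              simp only [List.getElem_cons_succ]
              refine pvEntry_run_step l k nl d stack[d] c hck (by rw [hc2]; decide)
                (hE d hd2) (d+1) ?_
              rw [hc2]
              unfold pvStepA
              rw [if_pos rfl, if_neg (by decide)]
              push_cast
              ring
        rw [hstep, ih (k+1) ((k, nl) :: stack) nl rep hv' hinv' j]
        constructor
        · rintro (h | ⟨nl0, hm, hAD⟩ | ⟨h1, hP⟩)
          · exact Or.inl h
          · rcases List.mem_cons.mp hm with heq | hm'
            · have hj : j = k := by
                have := Prod.ext_iff.mp heq
                exact this.1
              subst hj
              exact Or.inr (Or.inr ⟨le_refl _, hkl, by rw [hgd, hc2], hAD⟩)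
            · exact Or.inr (Or.inl ⟨nl0, hm', hAD⟩)
          · exact Or.inr (Or.inr ⟨by omega, hP⟩)
        · rintro (h | ⟨nl0, hm, hAD⟩ | ⟨h1, h2, h3, h4⟩)
          · exact Or.inl h
          · exact Or.inr (Or.inl ⟨nl0, List.mem_cons_of_mem _ hm, hAD⟩)
          · by_cases hj : j = k
            · subst hj
              exact Or.inr (Or.inl ⟨nl, List.mem_cons_self, h4⟩)
            · exact Or.inr (Or.inr ⟨by omega, h2, h3, h4⟩)
      · by_cases hc3 : c = ']'
        · cases stack with
          | nil =>
            have hstep : pvPassB (c :: v') k [] nl rep = pvPassB v' (k+1) [] nl rep := by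
              simp [pvPassB, hc3]
            rw [hstep, ih (k+1) [] nl rep hv'
              ⟨List.Pairwise.nil, by intro d hd; simp at hd⟩ j]
            have hsh := pvClauseShift l k j (by rw [hgd, hc3]; decide)
            exact or_congr Iff.rfl (or_congr Iff.rfl hsh.symm)
          | cons top s =>
            obtain ⟨j0, nl0⟩ := top
            have hent0 := hE 0 (by simp)
            simp only [List.getElem_cons_zero] at hent0
            obtain ⟨h01, h02, h03, h04⟩ := hent0
            have hPW' := List.pairwise_cons.mp hPW
            have hinv' : pvSInv l (k+1) s nl := by
              refine ⟨hPW'.2, ?_⟩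
              intro d hd
              have hent := hE (d+1) (by simpa using hd)
              simp only [List.getElem_cons_succ] at hent
              refine pvEntry_run_step l k nl (d+1) s[d] c hck (by rw [hc3]; decide)
                hent d ?_
              rw [hc3]
              unfold pvStepA
              rw [if_neg (by decide), if_pos rfl]
              push_cast
              ring
            by_cases hlt : nl0 < nl
            · have hAD0 : pvLhnf 1 (l.drop (j0+1)) = some true := by
                rcases h04 with ⟨-, hb⟩ | ⟨ha, -⟩
                · exact hb
                · omega
              have hstep : pvPassB (c :: v') k ((j0, nl0) :: s) nl rep =
                  pvPassB v' (k+1) s nl (j0 :: rep) := by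
                simp [pvPassB, hc3, hlt]
              rw [hstep, ih (k+1) s nl (j0 :: rep) hv' hinv' j]
              constructor
              · rintro (h | ⟨nl1, hm, hAD⟩ | ⟨h1, hP⟩)
                · rcases List.mem_cons.mp h with rfl | h'
                  · exact Or.inr (Or.inl ⟨nl0, List.mem_cons_self, hAD0⟩)
                  · exact Or.inl h'
                · exact Or.inr (Or.inl ⟨nl1, List.mem_cons_of_mem _ hm, hAD⟩)
                · exact Or.inr (Or.inr ⟨by omega, hP⟩)
              · rintro (h | ⟨nl1, hm, hAD⟩ | ⟨h1, h2, h3, h4⟩)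
                · exact Or.inl (List.mem_cons_of_mem _ h)
                · rcases List.mem_cons.mp hm with heq | hm'
                  · have hj : j = j0 := (Prod.ext_iff.mp heq).1
                    subst hj
                    exact Or.inl List.mem_cons_self
                  · exact Or.inr (Or.inl ⟨nl1, hm', hAD⟩)
                · have hj : j ≠ k := by
                    intro e
                    rw [e, hgd, hc3] at h3
                    exact absurd h3 (by decide)
                  exact Or.inr (Or.inr ⟨by omega, h2, h3, h4⟩)
            · have hrun : pvRun 1 ((l.drop (j0+1)).take (k - (j0+1))) = Sum.inl 1 := by
                rcases h04 with ⟨ha, -⟩ | ⟨-, hb⟩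
                · omega
                · norm_num at hb
                  exact hb
              have hAD0 : pvLhnf 1 (l.drop (j0+1)) = some false := by
                have hAD := pvAD_from_run l j0 k 1 h01 hrun
                rw [hk, hc3] at hAD
                rw [hAD]
                simp only [pvLhnf]
                rw [if_neg (by decide), if_neg (by decide)]
                unfold pvStepA
                rw [if_neg (by decide), if_pos rfl]
                norm_num [pvLhnf_zero]
              have hstep : pvPassB (c :: v') k ((j0, nl0) :: s) nl rep =
                  pvPassB v' (k+1) s nl rep := by
                simp [pvPassB, hc3, hlt]
              rw [hstep, ih (k+1) s nl rep hv' hinv' j]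
              constructor
              · rintro (h | ⟨nl1, hm, hAD⟩ | ⟨h1, hP⟩)
                · exact Or.inl h
                · exact Or.inr (Or.inl ⟨nl1, List.mem_cons_of_mem _ hm, hAD⟩)
                · exact Or.inr (Or.inr ⟨by omega, hP⟩)
              · rintro (h | ⟨nl1, hm, hAD⟩ | ⟨h1, h2, h3, h4⟩)
                · exact Or.inl h
                · rcases List.mem_cons.mp hm with heq | hm'
                  · exfalso
                    have hj : j = j0 := (Prod.ext_iff.mp heq).1
                    rw [hj, hAD0] at hAD
                    simp at hAD
                  · exact Or.inr (Or.inl ⟨nl1, hm', hAD⟩)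
                · have hj : j ≠ k := by
                    intro e
                    rw [e, hgd, hc3] at h3
                    exact absurd h3 (by decide)
                  exact Or.inr (Or.inr ⟨by omega, h2, h3, h4⟩)
        · have hstep : pvPassB (c :: v') k stack nl rep =
              pvPassB v' (k+1) stack nl rep := by
            simp [pvPassB, hc1, hc2, hc3]
          have hinv' : pvSInv l (k+1) stack nl := by
            refine ⟨hPW, ?_⟩
            intro d hd
            refine pvEntry_run_step l k nl d stack[d] c hck hc1 (hE d hd) d ?_
            unfold pvStepA
            rw [if_neg hc2, if_neg hc3]
            ring
          rw [hstep, ih (k+1) stack nl rep hv' hinv' j]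
          have hsh := pvClauseShift l k j (by rw [hgd]; exact hc2)
          exact or_congr Iff.rfl (or_congr Iff.rfl hsh.symm)

theorem pvRep_mem (l : List Char) (j : Nat) :
    j ∈ pvRep l ↔
      j < l.length ∧ l.getD j ' ' = '[' ∧ pvLhnf 1 (l.drop (j+1)) = some true := by
  have h := pvPassB_mem l l 0 [] 0 [] rfl ⟨List.Pairwise.nil, by intro d h; simp at h⟩ j
  unfold pvRep
  rw [h]
  simp

theorem pvLie_eq (s : List Char) :
    pvLie s = ((s.dropWhile (fun c => c = ' ' || c = '\n')).head?).map (fun c => c == ']') := by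
  induction s with
  | nil => rfl
  | cons c rest ih =>
    simp only [pvLie, List.dropWhile]
    split_ifs with h
    · simp only [h, ih]
    · simp [h]

theorem pvNxts_getD (l : List Char) : ∀ i, i ≤ l.length →
    (pvNxts l).getD i none = ((l.drop i).dropWhile (fun c => c = ' ' || c = '\n')).head? := by
  induction l with
  | nil => intro i _; cases i <;> simp [pvNxts, List.getD]
  | cons c rest ih =>
    intro i hi
    match i with
    | 0 =>
      rw [List.drop_zero, List.dropWhile_cons]
      simp only [pvNxts, List.getD_cons_zero]
      split_ifs with h
      · have h0 := ih 0 (Nat.zero_le _)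
        rw [List.drop_zero] at h0
        rw [← h0]
        simp [List.headD_eq_head?_getD, List.getD, List.head?_eq_getElem?]
      · simp
    | i+1 =>
      simp only [pvNxts, List.getD_cons_succ, List.drop_succ_cons]
      exact ih i (by simpa using hi)

theorem pvBal_cons (c : Char) (p : List Char) :
    pvBal (c :: p) = pvBal p + ((if c = ']' then (1:Int) else 0) - (if c = '[' then 1 else 0)) := by
  simp only [pvBal, List.count_cons]
  split_ifs <;> simp_all <;> omega

theorem pvClosedFrom_cons (lvl : Int) (c : Char) (tw : List Char) (h : 1 ≤ lvl) :
    pvClosedFrom lvl (c :: tw) = pvClosedFrom (pvStepA lvl c) tw := by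
  simp only [pvClosedFrom]
  rw [Bool.eq_iff_iff]
  simp only [List.any_eq_true, List.mem_range, decide_eq_true_eq]
  constructor
  · rintro ⟨j, hj, hle⟩
    match j with
    | 0 => simp [pvBal] at hle; omega
    | j+1 =>
      refine ⟨j, by simp at hj ⊢; omega, ?_⟩
      rw [List.take_succ_cons, pvBal_cons] at hle
      unfold pvStepA
      split_ifs at hle ⊢ <;> omega
  · rintro ⟨j, hj, hle⟩
    refine ⟨j+1, by simp at hj ⊢; omega, ?_⟩
    rw [List.take_succ_cons, pvBal_cons]
    unfold pvStepA at hle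
    split_ifs at hle ⊢ <;> omega

theorem pvClosedFrom_zero (tw : List Char) : pvClosedFrom 0 tw = true := by
  simp only [pvClosedFrom, List.any_eq_true]
  exact ⟨0, by simp, by simp [pvBal]⟩

theorem pvLhnf_char (s : List Char) : ∀ (lvl : Int), 1 ≤ lvl →
    pvLhnf lvl s =
      if pvClosedFrom lvl (s.takeWhile (fun c => c != '\n')) then some false
      else if '\n' ∈ s then some true
      else none := by
  induction s with
  | nil =>
    intro lvl h
    have hC : pvClosedFrom lvl [] = false := by
      simp only [pvClosedFrom, List.any_eq_false]
      intro j _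
      simp [pvBal]
      omega
    have hne : lvl ≠ 0 := by omega
    simp [pvLhnf, hC, hne]
  | cons c rest ih =>
    intro lvl h
    have hne : lvl ≠ 0 := by omega
    by_cases hc : c = '\n'
    · subst hc
      have htw : (('\n' : Char) :: rest).takeWhile (fun c => c != '\n') = [] := by
        simp
      have hC : pvClosedFrom lvl [] = false := by
        simp only [pvClosedFrom, List.any_eq_false]
        intro j _
        simp [pvBal]
        omega
      rw [htw]
      simp [pvLhnf, hne, hC]
    · have htw : ((c : Char) :: rest).takeWhile (fun c => c != '\n') =
          c :: rest.takeWhile (fun c => c != '\n') := by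
        simp [hc]
      rw [htw, pvClosedFrom_cons _ _ _ h]
      have hL : pvLhnf lvl (c :: rest) = pvLhnf (pvStepA lvl c) rest := by
        simp [pvLhnf, hne, hc]
      by_cases h0 : pvStepA lvl c = 0
      · rw [hL, h0, pvClosedFrom_zero, pvLhnf_zero]
        simp
      · have h1 : 1 ≤ pvStepA lvl c := by
          unfold pvStepA at h0 ⊢
          split_ifs at h0 ⊢ <;> omega
        rw [hL, ih _ h1]
        have hmem : ('\n' ∈ c :: rest) ↔ ('\n' ∈ rest) := by
          simp only [List.mem_cons]
          have : ¬('\n' = c) := fun e => hc e.symm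
          simp [this]
        simp only [hmem]

theorem pvOk_cases (s : List Char) (h : pvOkSuffix s = true) :
    pvLhnf 1 s = some false ∨ (pvLhnf 1 s = some true ∧ pvLie s ≠ none) := by
  rw [pvLhnf_char s 1 le_rfl]
  unfold pvOkSuffix at h
  simp only [Bool.or_eq_true, Bool.and_eq_true, List.any_eq_true, List.contains_iff_mem,
    Bool.not_eq_eq_eq_not, Bool.not_true] at h
  rcases h with h1 | ⟨hmem, cw, hcw, hns⟩
  · left
    simp [h1]
  · by_cases hC : pvClosedFrom 1 (s.takeWhile (fun c => c != '\n')) = true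
    · left
      simp [hC]
    · right
      refine ⟨by simp [hC, hmem], ?_⟩
      rw [pvLie_eq]
      simp only [ne_eq, Option.map_eq_none_iff, List.head?_eq_none_iff]
      intro hnil
      rw [List.dropWhile_eq_nil_iff] at hnil
      have := hnil cw hcw
      rw [hns] at this
      exact Bool.false_ne_true this

theorem pvGoA_eq (l : List Char) (v : List Char) :
    ∀ (k : Nat), l.drop k = v →
    (∀ i, i < l.length → l.getD i ' ' = '[' → pvOkSuffix (l.drop (i+1)) = true) →
    pvGoA v = some (pvOutB v k (pvRep l) (pvNxts l)) := by
  induction v with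
  | nil => intro k hk hPre; rfl
  | cons c v' ih =>
    intro k hk hPre
    have hkl : k < l.length := by
      by_contra hge
      rw [List.drop_eq_nil_of_le (by omega)] at hk
      simp at hk
    have hck : l[k]? = some c := by
      have h0 : (l.drop k)[0]? = l[k + 0]? := List.getElem?_drop
      rw [hk] at h0
      simpa using h0.symm
    have hgd : l.getD k ' ' = c := by rw [List.getD_eq_getElem?_getD, hck]; rfl
    have hv' : l.drop (k+1) = v' := by
      have := congrArg (List.drop 1) hk
      rw [List.drop_drop] at this
      simpa using this
    have hIH := ih (k+1) hv' hPre
    by_cases hc : c = '['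
    · have hok : pvOkSuffix v' = true := by
        rw [← hv']
        exact hPre k hkl (by rw [hgd, hc])
      rcases pvOk_cases v' hok with hF | ⟨hT, hlie⟩
      · have hrep : ¬ k ∈ pvRep l := by
          rw [pvRep_mem]
          rintro ⟨-, -, hADt⟩
          rw [hv', hF] at hADt
          simp at hADt
        have hcont : (pvRep l).contains k = false := by
          rw [← Bool.not_eq_true, List.contains_iff_mem]
          exact hrep
        simp only [pvGoA, pvOutB, hc, if_true, hF, hcont, Bool.false_and,
          Bool.false_eq_true, if_false, hIH, Option.map_some]
      · have hkrep : k ∈ pvRep l := by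
          rw [pvRep_mem]
          exact ⟨hkl, by rw [hgd, hc], by rw [hv']; exact hT⟩
        have hcont : (pvRep l).contains k = true := by
          rw [List.contains_iff_mem]; exact hkrep
        obtain ⟨b, hb⟩ : ∃ b, pvLie v' = some b := by
          cases hx : pvLie v' with
          | none => exact absurd hx hlie
          | some b => exact ⟨b, rfl⟩
        have hnx : (pvNxts l).getD (k+1) none =
            ((v').dropWhile (fun c => c = ' ' || c = '\n')).head? := by
          rw [pvNxts_getD l (k+1) (by omega), hv']
        have hb' := hb
        rw [pvLie_eq] at hb'
        cases hh : ((v').dropWhile (fun c => c = ' ' || c = '\n')).head? with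
        | none => rw [hh] at hb'; simp at hb'
        | some c0 =>
          rw [hh] at hb'
          simp only [Option.map_some, Option.some.injEq] at hb'
          cases b with
          | true =>
            have hc0 : c0 = ']' := by
              have := hb'.symm
              simpa using this
            have hcond : ((pvRep l).contains k &&
                ((pvNxts l).getD (k+1) none != some ']')) = false := by
              rw [hcont, hnx, hh, hc0]
              simp
            simp only [pvGoA, pvOutB, hc, if_true, hT, hb, hcond,
              Bool.false_eq_true, if_false, hIH, Option.map_some]
          | false =>
            have hc0 : ¬ c0 = ']' := by
              intro e
              rw [e] at hb'
              simp at hb'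
            have hcond : ((pvRep l).contains k &&
                ((pvNxts l).getD (k+1) none != some ']')) = true := by
              rw [hcont, hnx, hh]
              simp [hc0]
            simp only [pvGoA, pvOutB, hc, if_true, hT, hb, hcond, if_true,
              hIH, Option.map_some]
    · have hrep : ¬ k ∈ pvRep l := by
        rw [pvRep_mem]
        rintro ⟨-, hgd', -⟩
        rw [hgd] at hgd'
        exact hc hgd'
      have hcont : (pvRep l).contains k = false := by
        rw [← Bool.not_eq_true, List.contains_iff_mem]
        exact hrep
      simp only [pvGoA, pvOutB, hc, if_false, hcont, Bool.false_and,
        Bool.false_eq_true, hIH, Option.map_some]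

-- ===== VERDICT (by name: the statement is the Claim_ definition above) =====
theorem mark_start_newline_lists_spec : Claim_equal_mark_start_newline_lists := by
  intro old _ hPre
  unfold Spec_mark_start_newline_lists
  unfold mark_start_newline_lists mark_start_newline_lists_alt
  rw [pvGoA_eq old.toList old.toList 0 rfl hPre]
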